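-- pv_equiv track=rewrite | github.com/TonySY2/AgentDropoutV2 | test/AgentDropout/agents/final_decision.py | extract_example
-- ===== SOURCE A (Python) =====
-- def extract_example(prompt_text: str) -> list:
--     lines = (line.strip() for line in prompt_text.split('\n') if line.strip())
--     results = []
--     lines_iter = iter(lines)
--     for line in lines_iter:
--         if line.startswith('>>>'):
--             function_call = line[4:]
--             expected_output = next(lines_iter, None)
--             if expected_output:
--                 results.append(f"assert {function_call} == {expected_output}")
--     return results
-- ===== SOURCE B (Python) =====
-- def extract_example(prompt_text: str) -> list:
--     lines = [s for s in (line.strip() for line in prompt_text.split('\n')) if s]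
--     results = []
--     pending = None
--     for line in lines:
--         if pending is not None:
--             results.append(f"assert {pending} == {line}")
--             pending = None
--         elif line.startswith('>>>'):
--             pending = line[4:]
--     return results
-- ===== Notes on version B (the rewrite author's own statement) =====
-- stated objective: alternative
-- what changed: Replaces A's iterator look-ahead (explicit next() to consume the expected-output line) with a single-pass loop over a materialised line list carrying a 'pending' state variable checked before the '>>>' test.
import Mathlib
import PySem

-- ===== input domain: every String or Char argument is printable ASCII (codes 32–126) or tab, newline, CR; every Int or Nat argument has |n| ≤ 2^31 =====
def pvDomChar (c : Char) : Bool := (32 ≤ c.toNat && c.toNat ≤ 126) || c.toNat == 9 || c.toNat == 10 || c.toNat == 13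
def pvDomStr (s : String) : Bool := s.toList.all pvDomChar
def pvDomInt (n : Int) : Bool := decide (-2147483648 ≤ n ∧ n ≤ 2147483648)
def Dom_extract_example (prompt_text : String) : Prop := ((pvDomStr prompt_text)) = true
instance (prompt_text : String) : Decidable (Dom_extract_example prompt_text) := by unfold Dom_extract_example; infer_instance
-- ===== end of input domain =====

-- B replaces A's iterator look-ahead (next() consuming the expected line) with a single
-- pass over the materialised line list carrying a 'pending' state variable (alternative).


-- ===== PORT A =====
-- the for-loop over the iterator, with the inner next(lines_iter, None) = head of the rest
def pvLoopA : List String → List String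
  | [] => []
  | l :: rest =>
      if PySem.Str.startswith l ">>>" then
        match rest with
        | [] => []                                   -- next(…, None) = None: no append, loop ends
        | e :: r =>                                  -- expected_output = e (nonempty, so truthy)
            ("assert " ++ PySem.Str.slice l (some 4) none ++ " == " ++ e) :: pvLoopA r
      else pvLoopA rest

def extract_example (prompt_text : String) : List String :=
  pvLoopA ((((PySem.Str.split? prompt_text "\n").getD []).map PySem.Str.strip).filter (fun l => l ≠ ""))

-- ===== PORT B =====
-- one loop step over state (results, pending)
def pvStepB (st : List String × Option String) (line : String) : List String × Option String :=
  match st.2 with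
  | some p => (st.1 ++ ["assert " ++ p ++ " == " ++ line], none)
  | none =>
      if PySem.Str.startswith line ">>>" then (st.1, some (PySem.Str.slice line (some 4) none))
      else (st.1, none)

def extract_example_alt (prompt_text : String) : List String :=
  (((((PySem.Str.split? prompt_text "\n").getD []).map PySem.Str.strip).filter
      (fun l => l ≠ "")).foldl pvStepB ([], none)).1

-- ===== PRECONDITION & SPEC =====
def Spec_extract_example (prompt_text : String) (out : List String) : Prop := out = extract_example_alt prompt_text
instance (prompt_text : String) (out : List String) : Decidable (Spec_extract_example prompt_text out) := by unfold Spec_extract_example; infer_instance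

-- ===== CLAIM (what is proved, stated in full; the proofs are below) =====
def Claim_equal_extract_example : Prop := ∀ (prompt_text : String), Dom_extract_example prompt_text → Spec_extract_example prompt_text (extract_example prompt_text)

-- ===== LEMMAS AND PROOFS =====

-- recursive rendering of B's loop, used only by the proofs
def pvG : Option String → List String → List String
  | _, [] => []
  | some p, e :: r => ("assert " ++ p ++ " == " ++ e) :: pvG none r
  | none, l :: rest =>
      if PySem.Str.startswith l ">>>" then pvG (some (PySem.Str.slice l (some 4) none)) rest
      else pvG none rest

theorem pvFoldB_eq_pvG (ls : List String) :
    ∀ (acc : List String) (pending : Option String),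
      (ls.foldl pvStepB (acc, pending)).1 = acc ++ pvG pending ls := by
  induction ls with
  | nil => intro acc pending; simp [pvG]
  | cons l rest ih =>
      intro acc pending
      cases pending with
      | some p => simp [List.foldl, pvStepB, pvG, ih]
      | none =>
          by_cases h : PySem.Chars.startswith l.toList ['>', '>', '>'] = true
          · simp [List.foldl, pvStepB, pvG, h, ih]
          · simp [List.foldl, pvStepB, pvG, h, ih]

theorem pvLoopA_eq_pvG (ls : List String) : pvLoopA ls = pvG none ls := by
  match ls with
  | [] => rfl
  | l :: rest =>
    by_cases h : PySem.Chars.startswith l.toList ['>', '>', '>'] = true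
    · match rest with
      | [] => simp [pvLoopA, pvG, h]
      | e :: r => simp [pvLoopA, pvG, h, pvLoopA_eq_pvG r]
    · match rest with
      | [] => simp [pvLoopA, pvG, h]
      | e :: r => simp [pvLoopA, pvG, h, pvLoopA_eq_pvG (e :: r)]
termination_by ls.length

-- ===== VERDICT (by name: the statement is the Claim_ definition above) =====
theorem extract_example_spec : Claim_equal_extract_example := by
  intro p _
  unfold Spec_extract_example extract_example extract_example_alt
  rw [pvFoldB_eq_pvG, pvLoopA_eq_pvG, List.nil_append]
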